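-- pv_equiv track=rewrite | github.com/ankitjnyadav/30-Days-of-Code | 30 Days of Code/Day29 - Bitwise AND/Day29.py | bitwise
-- ===== SOURCE A (Python) =====
-- def bitwise(n,k):
--     max = 0
--     for i in range(n,1,-1):
--         for j in range(i-1,0,-1):
--             res = i & j
--             if res > max and res < k:
--                 max = res
--             if max == k-1:
--                 break
--         if max == k-1:
--             break
--     return(max)
-- ===== SOURCE B (Python) =====
-- def bitwise(n, k):
--     # Closed form: the largest value v with 0 < v < k achievable as i & j
--     # for 1 <= j < i <= n is the largest v <= min(k-1, n-1) whose minimal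
--     # strict bitwise superset v | (v+1) still fits below n; 0 if none exists.
--     c = min(k - 1, n - 1)
--     if c < 1:
--         return 0
--     if c % 2 == 0:
--         return c
--     if (c | (c + 1)) <= n:
--         return c
--     return c - 1
-- ===== Notes on version B (the rewrite author's own statement) =====
-- stated objective: faster
-- what changed: Replaced A's O(n^2) double loop over all pairs (i, j) with an O(1) closed form: the answer is the largest v <= min(k-1, n-1) whose minimal strict bitwise superset v | (v+1) still fits below n, resolved by a parity test and one OR.
import Mathlib
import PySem

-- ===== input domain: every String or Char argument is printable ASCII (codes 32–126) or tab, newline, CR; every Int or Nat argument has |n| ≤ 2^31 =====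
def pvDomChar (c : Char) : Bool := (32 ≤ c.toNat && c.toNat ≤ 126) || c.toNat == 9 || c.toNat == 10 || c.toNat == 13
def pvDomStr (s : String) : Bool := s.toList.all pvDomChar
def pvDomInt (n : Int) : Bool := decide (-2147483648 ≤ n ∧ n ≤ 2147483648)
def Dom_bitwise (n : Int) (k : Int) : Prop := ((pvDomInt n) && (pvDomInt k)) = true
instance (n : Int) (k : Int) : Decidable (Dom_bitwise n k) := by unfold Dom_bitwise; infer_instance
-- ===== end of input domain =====

-- B replaces A's quadratic scan over all pairs (i, j) by an O(1) closed form built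
-- from the largest feasible candidate min(k-1, n-1) and a parity / superset test.

-- ===== PORT A =====
-- inner loop 'for j in range(i-1, 0, -1)' with its 'break' on max == k-1
-- (the lazy countdown range is transcribed as a countdown recursion on j)
def bitwiseInner (k i : Int) (m j : Int) : Int :=
  if h : 0 < j then
    let res := PySem.Int.band i j
    let m' := if res > m ∧ res < k then res else m
    if m' = k - 1 then m' else bitwiseInner k i m' (j - 1)
  else m
termination_by j.toNat
decreasing_by omega

-- outer loop 'for i in range(n, 1, -1)' with its 'break' on max == k-1
def bitwiseOuter (k m i : Int) : Int :=
  if h : 1 < i then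
    let m' := bitwiseInner k i m (i - 1)
    if m' = k - 1 then m' else bitwiseOuter k m' (i - 1)
  else m
termination_by i.toNat
decreasing_by omega

def bitwise (n : Int) (k : Int) : Int :=
  bitwiseOuter k 0 n

-- ===== PORT B =====
def bitwise_alt (n : Int) (k : Int) : Int :=
  let c := min (k - 1) (n - 1)
  if c < 1 then 0
  else if PySem.Int.mod c 2 = 0 then c
  else if PySem.Int.bor c (c + 1) ≤ n then c
  else c - 1

-- ===== PRECONDITION & SPEC =====
def Spec_bitwise (n : Int) (k : Int) (out : Int) : Prop := out = bitwise_alt n k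
instance (n : Int) (k : Int) (out : Int) : Decidable (Spec_bitwise n k out) := by unfold Spec_bitwise; infer_instance

-- ===== CLAIM (what is proved, stated in full; the proofs are below) =====
def Claim_equal_bitwise : Prop := ∀ (n : Int) (k : Int), Dom_bitwise n k → Spec_bitwise n k (bitwise n k)

-- ===== LEMMAS AND PROOFS =====

-- the body of A's inner loop, break removed
def bwStep (k i : Int) (m j : Int) : Int :=
  if PySem.Int.band i j > m ∧ PySem.Int.band i j < k then PySem.Int.band i j else m

-- the whole inner loop as a fold (break removed)
def bwG (k : Int) (m i : Int) : Int :=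
  List.foldl (bwStep k i) m (PySem.List.pyRange (i - 1) 0 (-1))

lemma bwStep_stay {k i m : Int} (h : k - 1 ≤ m) (j : Int) : bwStep k i m j = m := by
  unfold bwStep; split_ifs with hc
  · omega
  · rfl

lemma foldl_bwStep_stay {k i m : Int} (h : k - 1 ≤ m) (js : List Int) :
    List.foldl (bwStep k i) m js = m := by
  induction js with
  | nil => rfl
  | cons j js ih => simp [List.foldl, bwStep_stay h, ih]

lemma bitwiseInner_eq (k i : Int) (j : Int) (m : Int) :
    bitwiseInner k i m j = List.foldl (bwStep k i) m (PySem.List.pyRange j 0 (-1)) := by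
  suffices H : ∀ (N : Nat) (j : Int), j.toNat ≤ N → ∀ m,
      bitwiseInner k i m j = List.foldl (bwStep k i) m (PySem.List.pyRange j 0 (-1)) from
    H j.toNat j le_rfl m
  intro N
  induction N with
  | zero =>
    intro j hj m
    rw [bitwiseInner, dif_neg (by omega), PySem.List.pyRange_neg_one_eq_nil (by omega)]
    rfl
  | succ N ih =>
    intro j hj m
    by_cases hjp : 0 < j
    · rw [bitwiseInner, dif_pos hjp, PySem.List.pyRange_neg_one_cons hjp]
      simp only [List.foldl]
      by_cases h : (if PySem.Int.band i j > m ∧ PySem.Int.band i j < k then PySem.Int.band i j else m) = k - 1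
      · rw [if_pos h]
        show _ = List.foldl (bwStep k i) (bwStep k i m j) (PySem.List.pyRange (j - 1) 0 (-1))
        rw [show bwStep k i m j = (if PySem.Int.band i j > m ∧ PySem.Int.band i j < k then PySem.Int.band i j else m) from rfl, h,
          foldl_bwStep_stay (by omega)]
      · rw [if_neg h, ih (j - 1) (by omega)]
        rfl
    · rw [bitwiseInner, dif_neg hjp, PySem.List.pyRange_neg_one_eq_nil (by omega)]
      rfl

lemma foldl_bwG_stay {k m : Int} (h : k - 1 ≤ m) (is : List Int) :
    List.foldl (bwG k) m is = m := by
  induction is with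
  | nil => rfl
  | cons i is ih => simp [List.foldl, bwG, foldl_bwStep_stay h, ih]

lemma bitwiseOuter_eq (k : Int) (i : Int) (m : Int) :
    bitwiseOuter k m i = List.foldl (bwG k) m (PySem.List.pyRange i 1 (-1)) := by
  suffices H : ∀ (N : Nat) (i : Int), i.toNat ≤ N → ∀ m,
      bitwiseOuter k m i = List.foldl (bwG k) m (PySem.List.pyRange i 1 (-1)) from
    H i.toNat i le_rfl m
  intro N
  induction N with
  | zero =>
    intro i hi m
    rw [bitwiseOuter, dif_neg (by omega), PySem.List.pyRange_neg_one_eq_nil (by omega)]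
    rfl
  | succ N ih =>
    intro i hi m
    by_cases hip : 1 < i
    · rw [bitwiseOuter, dif_pos hip, PySem.List.pyRange_neg_one_cons (by omega)]
      simp only [List.foldl]
      by_cases h : bitwiseInner k i m (i - 1) = k - 1
      · rw [if_pos h]
        have hg : bwG k m i = k - 1 := by rw [bwG, ← bitwiseInner_eq, h]
        rw [hg, foldl_bwG_stay (by omega)]
        exact h
      · rw [if_neg h, ih (i - 1) (by omega)]
        congr 1
        rw [bwG, ← bitwiseInner_eq]
    · rw [bitwiseOuter, dif_neg hip, PySem.List.pyRange_neg_one_eq_nil (by omega)]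
      rfl

-- characterization of the inner fold
lemma foldl_bwStep_char (k i : Int) (js : List Int) (m : Int) :
    m ≤ List.foldl (bwStep k i) m js ∧
    (List.foldl (bwStep k i) m js = m ∨
      ∃ j ∈ js, List.foldl (bwStep k i) m js = PySem.Int.band i j ∧
        List.foldl (bwStep k i) m js < k) ∧
    (∀ j ∈ js, PySem.Int.band i j < k → PySem.Int.band i j ≤ List.foldl (bwStep k i) m js) := by
  induction js generalizing m with
  | nil => simp
  | cons j js ih =>
    simp only [List.foldl, List.mem_cons]
    obtain ⟨ih1, ih2, ih3⟩ := ih (bwStep k i m j)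
    have hmm1 : m ≤ bwStep k i m j ∧
        (bwStep k i m j = m ∨ (bwStep k i m j = PySem.Int.band i j ∧ PySem.Int.band i j < k)) := by
      unfold bwStep; split_ifs with hcond
      · exact ⟨by omega, Or.inr ⟨rfl, hcond.2⟩⟩
      · exact ⟨le_refl m, Or.inl rfl⟩
    refine ⟨le_trans hmm1.1 ih1, ?_, ?_⟩
    · rcases ih2 with h | ⟨j', hj', hr, hrk⟩
      · rcases hmm1.2 with h2 | ⟨h2, h3⟩
        · exact Or.inl (by rw [h, h2])
        · exact Or.inr ⟨j, Or.inl rfl, by rw [h, h2], by rw [h, h2]; exact h3⟩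
      · exact Or.inr ⟨j', Or.inr hj', hr, hrk⟩
    · intro j' hj' hk'
      rcases hj' with rfl | hj'
      · by_cases hgt : PySem.Int.band i j' > m
        · have he : bwStep k i m j' = PySem.Int.band i j' := by
            unfold bwStep; rw [if_pos ⟨hgt, hk'⟩]
          calc PySem.Int.band i j' = bwStep k i m j' := he.symm
            _ ≤ _ := ih1
        · have : PySem.Int.band i j' ≤ m := by omega
          exact le_trans this (le_trans hmm1.1 ih1)
      · exact ih3 j' hj' hk'

-- characterization of the outer fold
lemma foldl_bwG_char (k : Int) (is : List Int) (m : Int) :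
    m ≤ List.foldl (bwG k) m is ∧
    (List.foldl (bwG k) m is = m ∨
      ∃ i ∈ is, ∃ j ∈ PySem.List.pyRange (i - 1) 0 (-1),
        List.foldl (bwG k) m is = PySem.Int.band i j ∧ List.foldl (bwG k) m is < k) ∧
    (∀ i ∈ is, ∀ j ∈ PySem.List.pyRange (i - 1) 0 (-1),
      PySem.Int.band i j < k → PySem.Int.band i j ≤ List.foldl (bwG k) m is) := by
  induction is generalizing m with
  | nil => simp
  | cons i is ih =>
    simp only [List.foldl, List.mem_cons]
    obtain ⟨ih1, ih2, ih3⟩ := ih (bwG k m i)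
    obtain ⟨g1, g2, g3⟩ := foldl_bwStep_char k i (PySem.List.pyRange (i - 1) 0 (-1)) m
    have hg1 : m ≤ bwG k m i := g1
    refine ⟨le_trans hg1 ih1, ?_, ?_⟩
    · rcases ih2 with h | ⟨i', hi', j', hj', hr, hrk⟩
      · rcases g2 with h2 | ⟨j', hj', hr2, hrk2⟩
        · exact Or.inl (by rw [h]; exact h2)
        · exact Or.inr ⟨i, Or.inl rfl, j', hj', by rw [h]; exact hr2, by rw [h]; exact hrk2⟩
      · exact Or.inr ⟨i', Or.inr hi', j', hj', hr, hrk⟩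
    · intro i' hi' j' hj' hk'
      rcases hi' with rfl | hi'
      · exact le_trans (g3 j' hj' hk') ih1
      · exact ih3 i' hi' j' hj' hk'

-- ---- Nat bit lemmas ----
lemma natAnd11 (a b : Nat) : (2*a+1) &&& (2*b+1) = 2*(a &&& b)+1 := by
  apply Nat.eq_of_testBit_eq; intro i
  cases i with
  | zero => simp
  | succ i =>
    have h1 : (2*a+1)/2 = a := by omega
    have h2 : (2*b+1)/2 = b := by omega
    have h3 : (2*(a &&& b)+1)/2 = a &&& b := by omega
    simp only [Nat.testBit_add_one, Nat.and_div_two, h1, h2, h3]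

lemma natAnd10 (a b : Nat) : (2*a+1) &&& (2*b) = 2*(a &&& b) := by
  apply Nat.eq_of_testBit_eq; intro i
  cases i with
  | zero => simp [Nat.testBit_zero]
  | succ i =>
    have h1 : (2*a+1)/2 = a := by omega
    have h2 : (2*b)/2 = b := by omega
    have h3 : (2*(a &&& b))/2 = a &&& b := by omega
    simp only [Nat.testBit_add_one, Nat.and_div_two, h1, h2, h3]

lemma natOr10 (a b : Nat) : (2*a+1) ||| (2*b) = 2*(a ||| b)+1 := by
  apply Nat.eq_of_testBit_eq; intro i
  cases i with
  | zero => simp [Nat.testBit_zero]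
  | succ i =>
    have h1 : (2*a+1)/2 = a := by omega
    have h2 : (2*b)/2 = b := by omega
    have h3 : (2*(a ||| b)+1)/2 = a ||| b := by omega
    simp only [Nat.testBit_add_one, Nat.or_div_two, h1, h2, h3]

lemma natAbsorb (a b : Nat) : a &&& (a ||| b) = a := by
  apply Nat.eq_of_testBit_eq; intro i
  simp [Nat.testBit_and, Nat.testBit_or]; tauto

lemma natEvenOrSucc {a : Nat} (h : a % 2 = 0) : a ||| (a+1) = a+1 := by
  obtain ⟨b, rfl⟩ : ∃ b, a = 2*b := ⟨a/2, by omega⟩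
  rw [Nat.or_comm, natOr10, Nat.or_self]

lemma natEvenAndSucc {a : Nat} (h : a % 2 = 0) : (a+1) &&& a = a := by
  obtain ⟨b, rfl⟩ : ∃ b, a = 2*b := ⟨a/2, by omega⟩
  rw [natAnd10, Nat.and_self]

-- KEY: a strict bitwise superset of a is at least a ||| (a+1)
lemma natKey (a : Nat) : ∀ w, a &&& w = a → a < w → a ||| (a+1) ≤ w := by
  induction a using Nat.strong_induction_on with
  | _ a ih =>
    intro w hsub hlt
    rcases Nat.even_or_odd a with he | ho
    · have ha2 : a % 2 = 0 := Nat.even_iff.mp he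
      rw [natEvenOrSucc ha2]; omega
    · have ha2 : a % 2 = 1 := Nat.odd_iff.mp ho
      obtain ⟨b, rfl⟩ : ∃ b, a = 2*b+1 := ⟨a/2, by omega⟩
      rcases Nat.even_or_odd w with hwe | hwo
      · exfalso
        have hw2 : w % 2 = 0 := Nat.even_iff.mp hwe
        obtain ⟨d, rfl⟩ : ∃ d, w = 2*d := ⟨w/2, by omega⟩
        rw [natAnd10] at hsub; omega
      · have hw2 : w % 2 = 1 := Nat.odd_iff.mp hwo
        obtain ⟨d, rfl⟩ : ∃ d, w = 2*d+1 := ⟨w/2, by omega⟩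
        rw [natAnd11] at hsub
        have hbd : b &&& d = b := by omega
        have hlt' : b < d := by omega
        have hih := ih b (by omega) d hbd hlt'
        have e1 : (2*b+1) + 1 = 2*(b+1) := by ring
        rw [e1, natOr10 b (b+1)]
        omega

-- ---- Int consequences for positive operands ----
lemma band_le_right {i j : Int} (hi : 0 ≤ i) (hj : 0 ≤ j) : PySem.Int.band i j ≤ j := by
  rw [PySem.Int.band_of_nonneg hi hj]
  have := Nat.and_le_right (n := i.toNat) (m := j.toNat)
  omega

lemma band_nonneg {i j : Int} (hi : 0 ≤ i) (hj : 0 ≤ j) : 0 ≤ PySem.Int.band i j := by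
  rw [PySem.Int.band_of_nonneg hi hj]; exact Int.natCast_nonneg _

-- upper bound: any AND of a pair 1 ≤ j < i has its minimal strict superset ≤ i
lemma band_superset_le {i j : Int} (hj : 1 ≤ j) (hji : j < i) :
    PySem.Int.bor (PySem.Int.band i j) (PySem.Int.band i j + 1) ≤ i := by
  have hi : (0:Int) ≤ i := by omega
  have hj0 : (0:Int) ≤ j := by omega
  set a := i.toNat with ha
  set b := j.toNat with hb
  have hband : PySem.Int.band i j = ((a &&& b : Nat) : Int) := PySem.Int.band_of_nonneg hi hj0
  have hv : (0:Int) ≤ PySem.Int.band i j := by rw [hband]; exact Int.natCast_nonneg _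
  have hbor : PySem.Int.bor (PySem.Int.band i j) (PySem.Int.band i j + 1)
      = (((a &&& b) ||| ((a &&& b) + 1) : Nat) : Int) := by
    rw [hband]
    have : ((a &&& b : Nat) : Int) + 1 = (((a &&& b) + 1 : Nat) : Int) := by push_cast; ring
    rw [this, PySem.Int.bor_natCast]
  rw [hbor]
  -- Nat side: v = a &&& b, v ⊆ b and v ⊆ a; v < b or (v = b and v < a)
  have hvb : (a &&& b) ≤ b := Nat.and_le_right
  have hba : b < a := by omega
  by_cases hvb' : (a &&& b) = b
  · -- v = b ⊆ a, b < a
    have hsub : (a &&& b) &&& a = (a &&& b) := by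
      conv_lhs => rw [Nat.and_comm a b, Nat.and_assoc, Nat.and_self, ← Nat.and_comm a b]
    have := natKey (a &&& b) a hsub (by omega)
    omega
  · -- v < b, v ⊆ b
    have hsub : (a &&& b) &&& b = (a &&& b) := by
      rw [Nat.and_assoc, Nat.and_self]
    have := natKey (a &&& b) b hsub (by omega)
    omega

-- achievability: even c gives (c+1) & c = c ; odd c with c|(c+1) ≤ n gives (c|(c+1)) & c = c
lemma band_succ_even {c : Int} (hc : 0 ≤ c) (he : PySem.Int.mod c 2 = 0) :
    PySem.Int.band (c + 1) c = c := by
  set a := c.toNat with ha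
  have hc1 : c + 1 = ((a + 1 : Nat) : Int) := by omega
  have hc0 : c = ((a : Nat) : Int) := by omega
  rw [hc1, hc0, PySem.Int.band_natCast, natEvenAndSucc]
  · have := PySem.Int.mod_eq_emod_of_pos (a := c) (b := 2) (by omega)
    omega
lemma band_bor_self {c : Int} (hc : 0 ≤ c) :
    PySem.Int.band (PySem.Int.bor c (c + 1)) c = c := by
  set a := c.toNat with ha
  have hc1 : c + 1 = ((a + 1 : Nat) : Int) := by omega
  have hc0 : c = ((a : Nat) : Int) := by omega
  rw [hc1, hc0, PySem.Int.bor_natCast, PySem.Int.band_natCast, Nat.and_comm, natAbsorb]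

lemma bor_succ_gt {c : Int} (hc : 0 ≤ c) : c < PySem.Int.bor c (c + 1) := by
  set a := c.toNat with ha
  have hc1 : c + 1 = ((a + 1 : Nat) : Int) := by omega
  have hc0 : c = ((a : Nat) : Int) := by omega
  rw [hc1, hc0, PySem.Int.bor_natCast]
  have := Nat.right_le_or (n := a) (m := a + 1)
  omega

-- main equivalence
lemma bitwise_eq_alt (n k : Int) : bitwise n k = bitwise_alt n k := by
  rw [bitwise, bitwiseOuter_eq]
  obtain ⟨h0, hex, hub⟩ := foldl_bwG_char k (PySem.List.pyRange n 1 (-1)) 0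
  set R := List.foldl (bwG k) 0 (PySem.List.pyRange n 1 (-1)) with hR
  -- translate range membership into inequalities
  have hEx : R = 0 ∨ ∃ i j : Int, 1 < i ∧ i ≤ n ∧ 0 < j ∧ j ≤ i - 1 ∧
      R = PySem.Int.band i j ∧ R < k := by
    rcases hex with h | ⟨i, hi, j, hj, hr, hrk⟩
    · exact Or.inl h
    · rw [PySem.List.mem_pyRange_neg_one] at hi hj
      exact Or.inr ⟨i, j, hi.1, hi.2, hj.1, by omega, hr, hrk⟩
  have hUB : ∀ i j : Int, 1 < i → i ≤ n → 0 < j → j ≤ i - 1 →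
      PySem.Int.band i j < k → PySem.Int.band i j ≤ R := by
    intro i j h1 h2 h3 h4 h5
    exact hub i (PySem.List.mem_pyRange_neg_one.mpr ⟨h1, h2⟩)
      j (PySem.List.mem_pyRange_neg_one.mpr ⟨by omega, by omega⟩) h5
  -- structural facts about R
  have hRub : R = 0 ∨ (1 ≤ R ∧ R ≤ min (k - 1) (n - 1) ∧ PySem.Int.bor R (R + 1) ≤ n) := by
    rcases hEx with h | ⟨i, j, hi1, hin, hj0, hji, hr, hrk⟩
    · exact Or.inl h
    · have hR0 : 0 ≤ R := hr ▸ band_nonneg (by omega) (by omega)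
      by_cases hz : R = 0
      · exact Or.inl hz
      · refine Or.inr ⟨by omega, ?_, ?_⟩
        · have hRj : R ≤ j := hr ▸ band_le_right (by omega) (by omega)
          omega
        · have hsup : PySem.Int.bor R (R + 1) ≤ i := hr ▸ band_superset_le (by omega) (by omega)
          omega
  simp only [bitwise_alt]
  have hmodc : PySem.Int.mod (min (k - 1) (n - 1)) 2 = (min (k - 1) (n - 1)) % 2 :=
    PySem.Int.mod_eq_emod_of_pos (by omega)
  split_ifs with hlt hmod hbor
  · -- c < 1 : R = 0
    rcases hRub with h | ⟨h1, h2, _⟩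
    · exact h
    · omega
  · -- c ≥ 1, c even : R = c
    have hc1 : 1 ≤ min (k - 1) (n - 1) := by omega
    have hach : PySem.Int.band (min (k - 1) (n - 1) + 1) (min (k - 1) (n - 1))
        = min (k - 1) (n - 1) := band_succ_even (by omega) hmod
    have hlow := hUB (min (k - 1) (n - 1) + 1) (min (k - 1) (n - 1))
      (by omega) (by omega) (by omega) (by omega) (by rw [hach]; omega)
    rw [hach] at hlow
    rcases hRub with h | ⟨h1, h2, _⟩ <;> omega
  · -- c ≥ 1, c odd, c | (c+1) ≤ n : R = c
    have hc1 : 1 ≤ min (k - 1) (n - 1) := by omega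
    have hach : PySem.Int.band (PySem.Int.bor (min (k - 1) (n - 1)) (min (k - 1) (n - 1) + 1))
        (min (k - 1) (n - 1)) = min (k - 1) (n - 1) := band_bor_self (by omega)
    have hgt : min (k - 1) (n - 1) < PySem.Int.bor (min (k - 1) (n - 1)) (min (k - 1) (n - 1) + 1) :=
      bor_succ_gt (by omega)
    have hlow := hUB (PySem.Int.bor (min (k - 1) (n - 1)) (min (k - 1) (n - 1) + 1))
      (min (k - 1) (n - 1)) (by omega) (by omega) (by omega) (by omega) (by rw [hach]; omega)
    rw [hach] at hlow
    rcases hRub with h | ⟨h1, h2, _⟩ <;> omega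
  · -- c ≥ 1, c odd, c | (c+1) > n : R = c - 1
    have hc1 : 1 ≤ min (k - 1) (n - 1) := by omega
    -- upper bound: R ≤ c - 1
    have hup : R ≤ min (k - 1) (n - 1) - 1 := by
      rcases hRub with h | ⟨h1, h2, hsup⟩
      · omega
      · by_cases hReq : R = min (k - 1) (n - 1)
        · rw [hReq] at hsup; omega
        · omega
    -- lower bound
    by_cases hc2 : 2 ≤ min (k - 1) (n - 1)
    · have hmod' : PySem.Int.mod (min (k - 1) (n - 1) - 1) 2 = 0 := by
        rw [PySem.Int.mod_eq_emod_of_pos (by omega : (0:Int) < 2)]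
        omega
      have hach : PySem.Int.band (min (k - 1) (n - 1) - 1 + 1) (min (k - 1) (n - 1) - 1)
          = min (k - 1) (n - 1) - 1 := band_succ_even (by omega) hmod'
      have he : min (k - 1) (n - 1) - 1 + 1 = min (k - 1) (n - 1) := by omega
      rw [he] at hach
      have hlow := hUB (min (k - 1) (n - 1)) (min (k - 1) (n - 1) - 1)
        (by omega) (by omega) (by omega) (by omega) (by rw [hach]; omega)
      rw [hach] at hlow
      omega
    · omega

-- ===== VERDICT (by name: the statement is the Claim_ definition above) =====
theorem bitwise_spec : Claim_equal_bitwise := by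
  intro n k _
  show bitwise n k = bitwise_alt n k
  exact bitwise_eq_alt n k
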